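-- pv_equiv track=rewrite | github.com/clemp/ssie-644-research-project | scripts/utils.py | generate_schemas_from_solution
-- ===== SOURCE A (Python) =====
-- def generate_schemas_from_solution(bitstring, original=None, index=0) -> list:
--     """Given a bitstring solution, this recursive function returns all wildcard allele schemas present in that solution.
--
--     Args:
--         solution (str): a bitstring solution, eg "010011011".
--
--     Returns:
--         list: a list of all wildcard allele schemas present in the solution.
--     """
--     if original is None:
--         original = bitstring
--     if index == len(bitstring):
--         if bitstring == original:
--             return []
--         else:
--             return [bitstring]
--     else:
--         combinations = []
--         combinations += generate_schemas_from_solution(bitstring, original, index + 1)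
--         bitstring = bitstring[:index] + '*' + bitstring[index+1:]
--         combinations += generate_schemas_from_solution(bitstring, original, index + 1)
--         return combinations
-- ===== SOURCE B (Python) =====
-- def generate_schemas_from_solution(bitstring, original=None, index=0) -> list:
--     """Bitmask-counting re-implementation: enumerate all 2**m wildcard masks directly."""
--     if original is None:
--         original = bitstring
--     m = len(bitstring) - index
--     prefix = bitstring[:index]
--     result = []
--     for v in range(2 ** m):
--         cand = prefix + ''.join(
--             '*' if (v // 2 ** (m - 1 - j)) % 2 == 1 else bitstring[index + j]
--             for j in range(m))
--         if cand != original: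
--             result.append(cand)
--     return result
-- ===== Notes on version B (the rewrite author's own statement) =====
-- stated objective: alternative
-- what changed: Replaces A's binary recursion (recurse twice per position, keep vs star) with a single bitmask-counting loop over range(2**m) that builds each candidate schema directly from the bits of the counter.
-- outside the precondition, e.g. on generate_schemas_from_solution('0', None, -1): A returns ['*', '*0', '**', '*0', '**'], B returns ['00', '0*', '*0', '**']
import Mathlib
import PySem

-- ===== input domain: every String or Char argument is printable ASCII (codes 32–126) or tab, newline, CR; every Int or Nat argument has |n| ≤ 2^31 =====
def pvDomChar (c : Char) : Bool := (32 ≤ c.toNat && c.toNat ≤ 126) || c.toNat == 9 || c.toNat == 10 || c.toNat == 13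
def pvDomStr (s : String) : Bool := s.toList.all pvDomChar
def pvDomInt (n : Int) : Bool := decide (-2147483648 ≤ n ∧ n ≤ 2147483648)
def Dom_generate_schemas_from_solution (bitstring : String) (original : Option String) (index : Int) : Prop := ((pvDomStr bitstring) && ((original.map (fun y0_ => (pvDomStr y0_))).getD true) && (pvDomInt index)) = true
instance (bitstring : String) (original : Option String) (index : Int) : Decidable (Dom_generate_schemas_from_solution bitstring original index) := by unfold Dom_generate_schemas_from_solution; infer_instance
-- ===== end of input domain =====

-- B replaces A's binary recursion with one bitmask-counting loop over range(2**m) (alternative decomposition, same output).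

-- ===== PORT A =====
-- A's recursion; the fuel argument only makes the recursion structural (inside Pre_ the
-- depth is exactly (len - index) + 1, so the fuel never runs out there).
def pvGenA (fuel : Nat) (b : List Char) (orig : List Char) (index : Int) : List String :=
  match fuel with
  | 0 => []
  | f + 1 =>
    if index = (b.length : Int) then
      (if b = orig then [] else [String.ofList b])
    else
      -- combinations += recurse(index+1); bitstring = bitstring[:index] + '*' + bitstring[index+1:]; combinations += recurse(index+1)
      pvGenA f b orig (index + 1) ++
        pvGenA f (PySem.List.slice b none (some index) ++ ['*'] ++ PySem.List.slice b (some (index + 1)) none) orig (index + 1)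

def generate_schemas_from_solution (bitstring : String) (original : Option String) (index : Int) : List String :=
  let orig : List Char := (match original with | none => bitstring | some o => o).toList
  pvGenA (((bitstring.toList.length : Int) - index).toNat + 1) bitstring.toList orig index

-- ===== PORT B =====
def generate_schemas_from_solution_alt (bitstring : String) (original : Option String) (index : Int) : List String :=
  let bl := bitstring.toList
  let orig : List Char := (match original with | none => bitstring | some o => o).toList
  -- m = len(bitstring) - index  (Pre_ guarantees 0 ≤ index ≤ len, so toNat is exact)
  let m : Nat := (((bl.length : Int)) - index).toNat
  let pre := PySem.List.slice bl none (some index)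
  (PySem.List.pyRange 0 ((2 : Int) ^ m) 1).foldl
    (fun (result : List String) (v : Int) =>
      let cand : List Char := pre ++ (PySem.List.pyRange 0 (m : Int) 1).map
        (fun (j : Int) =>
          if PySem.Int.mod (PySem.Int.floordiv v ((2 : Int) ^ (m - 1 - (j.toNat)))) 2 = 1 then '*'
          else PySem.List.pyGetD bl (index + j) ' ')
      if cand ≠ orig then result ++ [String.ofList cand] else result)
    ([] : List String)

-- ===== PRECONDITION & SPEC =====
-- Pre_ excludes index > len(bitstring), where A raises RecursionError, and index < 0, where
-- A's value is an artefact of Python's negative-slice wraparound (the star insertion then GROWS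
-- the string, producing schemas longer than the input — outside the function's natural domain).
def Pre_generate_schemas_from_solution (bitstring : String) (original : Option String) (index : Int) : Prop :=
  0 ≤ index ∧ index ≤ (bitstring.toList.length : Int)
instance (bitstring : String) (original : Option String) (index : Int) : Decidable (Pre_generate_schemas_from_solution bitstring original index) := by unfold Pre_generate_schemas_from_solution; infer_instance

def pvWitness_generate_schemas_from_solution : String × Option String × Int := ("010", none, 0)

def Spec_generate_schemas_from_solution (bitstring : String) (original : Option String) (index : Int) (out : List String) : Prop := out = generate_schemas_from_solution_alt bitstring original index
instance (bitstring : String) (original : Option String) (index : Int) (out : List String) : Decidable (Spec_generate_schemas_from_solution bitstring original index out) := by unfold Spec_generate_schemas_from_solution; infer_instance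

-- ===== CLAIM (what is proved, stated in full; the proofs are below) =====
def Claim_equal_generate_schemas_from_solution : Prop := ∀ (bitstring : String) (original : Option String) (index : Int), Dom_generate_schemas_from_solution bitstring original index → Pre_generate_schemas_from_solution bitstring original index → Spec_generate_schemas_from_solution bitstring original index (generate_schemas_from_solution bitstring original index)

-- ===== LEMMAS AND PROOFS =====

-- star b i: b with position i replaced by '*'
def pvStar (b : List Char) (i : Nat) : List Char := b.take i ++ '*' :: b.drop (i + 1)

-- the DFS leaves of A's recursion, indexed by the number m of remaining positions
def pvLeaves : Nat → List Char → Nat → List (List Char)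
  | 0, b, _ => [b]
  | m + 1, b, i => pvLeaves m b (i + 1) ++ pvLeaves m (pvStar b i) (i + 1)

-- B's candidate for mask value v (Nat form)
def pvCand (m : Nat) (b : List Char) (i : Nat) (v : Nat) : List Char :=
  b.take i ++ (List.range m).map (fun j => if (v / 2 ^ (m - 1 - j)) % 2 = 1 then '*' else b.getD (i + j) ' ')

theorem pvStar_length (b : List Char) (i : Nat) (h : i < b.length) :
    (pvStar b i).length = b.length := by
  simp [pvStar]; omega

theorem pvTake_succ (b : List Char) (i : Nat) (h : i < b.length) :
    b.take (i + 1) = b.take i ++ [b.getD i ' '] := by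
  rw [List.take_add_one]
  simp [List.getElem?_eq_getElem h, List.getD]

theorem pvStar_take (b : List Char) (i : Nat) (h : i ≤ b.length) :
    (pvStar b i).take (i + 1) = b.take i ++ ['*'] := by
  unfold pvStar
  rw [List.take_append]
  have h1 : (b.take i).length = i := by simp [h]
  rw [List.take_of_length_le (by omega), h1]
  simp

theorem pvStar_getD (b : List Char) (i p : Nat) (h : i + 1 ≤ p) (hi : i ≤ b.length) :
    (pvStar b i).getD p ' ' = b.getD p ' ' := by
  unfold pvStar
  have h1 : (b.take i).length = i := by simp [hi]
  rw [List.getD_append_right _ _ _ _ (by rw [h1]; omega), h1,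
      show p - i = (p - i - 1) + 1 from by omega]
  simp only [List.getD_cons_succ]
  simp [List.getD, List.getElem?_drop]
  rw [show i + 1 + (p - i - 1) = p from by omega]

theorem pvCand_keep (m : Nat) (b : List Char) (i : Nat) (v : Nat)
    (hv : v < 2 ^ m) (hi : i < b.length) :
    pvCand (m + 1) b i v = pvCand m b (i + 1) v := by
  unfold pvCand
  rw [List.range_succ_eq_map, pvTake_succ b i hi]
  simp only [List.map_cons, List.map_map, List.append_assoc, List.singleton_append]
  congr 1
  have h0 : ¬((v / 2 ^ (m + 1 - 1 - 0)) % 2 = 1) := by simp [Nat.div_eq_of_lt hv]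
  congr 1
  · rw [if_neg h0]; norm_num
  · apply List.map_congr_left
    intro j hj
    simp only [Function.comp_apply, Nat.succ_eq_add_one]
    rw [show m + 1 - 1 - (j + 1) = m - 1 - j from by omega,
        show i + (j + 1) = i + 1 + j from by omega]

theorem pvCand_star (m : Nat) (b : List Char) (i : Nat) (w : Nat)
    (hw : w < 2 ^ m) (hi : i < b.length) :
    pvCand (m + 1) b i (2 ^ m + w) = pvCand m (pvStar b i) (i + 1) w := by
  unfold pvCand
  rw [List.range_succ_eq_map, pvStar_take b i (le_of_lt hi)]
  simp only [List.map_cons, List.map_map, List.append_assoc, List.singleton_append]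
  congr 1
  have h0 : ((2 ^ m + w) / 2 ^ (m + 1 - 1 - 0)) % 2 = 1 := by
    have : m + 1 - 1 - 0 = m := by omega
    rw [this, Nat.add_comm, Nat.add_div_right _ (Nat.pow_pos (by norm_num)),
        Nat.div_eq_of_lt hw]
  congr 1
  · rw [if_pos h0]
  · apply List.map_congr_left
    intro j hj
    simp only [List.mem_range] at hj
    simp only [Function.comp_apply, Nat.succ_eq_add_one]
    rw [show m + 1 - 1 - (j + 1) = m - 1 - j from by omega,
        show i + (j + 1) = i + 1 + j from by omega]
    have hdiv : (2 ^ m + w) / 2 ^ (m - 1 - j) = 2 ^ (m - (m - 1 - j)) + w / 2 ^ (m - 1 - j) := by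
      have h2 : 2 ^ m = 2 ^ (m - 1 - j) * 2 ^ (m - (m - 1 - j)) := by
        rw [← pow_add]; congr 1; omega
      rw [h2, Nat.mul_add_div (Nat.pow_pos (by norm_num))]
    have hmod : (2 ^ (m - (m - 1 - j)) + w / 2 ^ (m - 1 - j)) % 2 = (w / 2 ^ (m - 1 - j)) % 2 := by
      have h1 : m - (m - 1 - j) = (m - (m - 1 - j) - 1) + 1 := by omega
      rw [h1, pow_succ, Nat.add_comm, Nat.add_mul_mod_self_right]
    rw [hdiv, hmod, pvStar_getD b i (i + 1 + j) (by omega) (le_of_lt hi)]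

-- core combinatorial fact: the masks in counting order are exactly the DFS leaves
theorem pvLeaves_eq_map (m : Nat) (b : List Char) (i : Nat) (h : b.length = i + m) :
    (List.range (2 ^ m)).map (pvCand m b i) = pvLeaves m b i := by
  induction m generalizing b i with
  | zero =>
    simp only [pow_zero, List.range_one, List.map_cons, List.map_nil, pvLeaves, pvCand,
      List.range_zero, List.map_nil, List.append_nil]
    rw [List.take_of_length_le (by omega)]
  | succ m ih =>
    have hi : i < b.length := by omega
    have hsplit : 2 ^ (m + 1) = 2 ^ m + 2 ^ m := by ring
    rw [hsplit, List.range_add, List.map_append, List.map_map]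
    unfold pvLeaves
    congr 1
    · rw [List.map_congr_left (fun v hv => pvCand_keep m b i v (List.mem_range.mp hv) hi)]
      exact ih b (i + 1) (by omega)
    · rw [List.map_congr_left (fun w hw => by
        simpa using pvCand_star m b i w (List.mem_range.mp hw) hi)]
      exact ih (pvStar b i) (i + 1) (by rw [pvStar_length b i hi]; omega)

-- A's recursion computes filter+map over the leaves
theorem pvGenA_eq (m : Nat) (b : List Char) (orig : List Char) (i : Nat) (fuel : Nat)
    (h : b.length = i + m) (hf : m < fuel) :
    pvGenA fuel b orig (i : Int) =
      ((pvLeaves m b i).filter (fun x => decide (x ≠ orig))).map String.ofList := by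
  induction m generalizing b i fuel with
  | zero =>
    obtain ⟨f, rfl⟩ : ∃ f, fuel = f + 1 := ⟨fuel - 1, by omega⟩
    rw [pvGenA]
    have : (i : Int) = (b.length : Int) := by omega
    rw [if_pos this]
    by_cases hb : b = orig <;> simp [pvLeaves, hb]
  | succ m ih =>
    obtain ⟨f, rfl⟩ : ∃ f, fuel = f + 1 := ⟨fuel - 1, by omega⟩
    rw [pvGenA]
    have hne : ¬((i : Int) = (b.length : Int)) := by omega
    rw [if_neg hne]
    have hslice1 : PySem.List.slice b none (some (i : Int)) = b.take i :=
      PySem.List.slice_to_natCast b i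
    have hslice2 : PySem.List.slice b (some ((i : Int) + 1)) none = b.drop (i + 1) := by
      have : (i : Int) + 1 = ((i + 1 : Nat) : Int) := by push_cast; ring
      rw [this, PySem.List.slice_from_natCast]
    have hcast : (i : Int) + 1 = ((i + 1 : Nat) : Int) := by push_cast; ring
    rw [hslice1, hslice2, hcast]
    have hb' : (b.take i ++ ['*'] ++ b.drop (i + 1)) = pvStar b i := by
      simp [pvStar]
    rw [hb']
    rw [ih b (i + 1) f (by omega) (by omega),
        ih (pvStar b i) (i + 1) f (by rw [pvStar_length b i (by omega)]; omega) (by omega)]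
    simp [pvLeaves, List.filter_append]

-- B's port, rewritten into the Nat-indexed filter/map form
theorem pvAlt_eq (bitstring : String) (original : Option String) (i : Nat)
    (hi : i ≤ bitstring.toList.length) :
    generate_schemas_from_solution_alt bitstring original (i : Int) =
      ((List.range (2 ^ (bitstring.toList.length - i))).map
          (pvCand (bitstring.toList.length - i) bitstring.toList i)
        |>.filter (fun x => decide (x ≠ (match original with | none => bitstring | some o => o).toList))
        |>.map String.ofList) := by
  unfold generate_schemas_from_solution_alt
  simp only []
  set bl := bitstring.toList with hbl
  set orig := (match original with | none => bitstring | some o => o).toList with horig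
  have hm : (((bl.length : Int)) - (i : Int)).toNat = bl.length - i := by omega
  rw [hm]
  set m := bl.length - i with hmdef
  rw [PySem.List.foldl_append_ite
        (p := fun v : Int =>
          (PySem.List.slice bl none (some (i : Int)) ++ (PySem.List.pyRange 0 (m : Int) 1).map
            (fun (j : Int) =>
              if PySem.Int.mod (PySem.Int.floordiv v ((2 : Int) ^ (m - 1 - (j.toNat)))) 2 = 1 then '*'
              else PySem.List.pyGetD bl ((i : Int) + j) ' ')) ≠ orig)
        (f := fun v : Int =>
          String.ofList
            (PySem.List.slice bl none (some (i : Int)) ++ (PySem.List.pyRange 0 (m : Int) 1).map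
              (fun (j : Int) =>
                if PySem.Int.mod (PySem.Int.floordiv v ((2 : Int) ^ (m - 1 - (j.toNat)))) 2 = 1 then '*'
                else PySem.List.pyGetD bl ((i : Int) + j) ' ')))]
  have hpow : ((2 : Int) ^ m).toNat = 2 ^ m := by
    rw [show (2 : Int) ^ m = ((2 ^ m : Nat) : Int) from by push_cast; ring]
    exact Int.toNat_natCast _
  rw [PySem.List.pyRange_zero ((2 : Int) ^ m), hpow, List.filter_map, List.map_map]
  have hF : ∀ k : Nat,
      (PySem.List.slice bl none (some (i : Int)) ++ (PySem.List.pyRange 0 (m : Int) 1).map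
        (fun (j : Int) =>
          if PySem.Int.mod (PySem.Int.floordiv ((k : Nat) : Int) ((2 : Int) ^ (m - 1 - (j.toNat)))) 2 = 1 then '*'
          else PySem.List.pyGetD bl ((i : Int) + j) ' ')) = pvCand m bl i k := by
    intro k
    unfold pvCand
    rw [PySem.List.slice_to_natCast, PySem.List.pyRange_zero_nat, List.map_map]
    congr 1
    apply List.map_congr_left
    intro j hj
    simp only [Function.comp_apply, Int.toNat_natCast]
    have e1 : (2 : Int) ^ (m - 1 - j) = ((2 ^ (m - 1 - j) : Nat) : Int) := by push_cast; ring
    have e2 : PySem.Int.floordiv ((k : Nat) : Int) (((2 ^ (m - 1 - j) : Nat) : Int)) = ((k / 2 ^ (m - 1 - j) : Nat) : Int) :=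
      PySem.Int.floordiv_natCast k (2 ^ (m - 1 - j))
    have e3 : PySem.Int.mod ((( k / 2 ^ (m - 1 - j) : Nat) : Int)) 2 = (((k / 2 ^ (m - 1 - j)) % 2 : Nat) : Int) := by
      exact_mod_cast PySem.Int.mod_natCast (k / 2 ^ (m - 1 - j)) 2
    have e4 : (i : Int) + (j : Int) = ((i + j : Nat) : Int) := by push_cast; ring
    simp only [e1, e2, e3, e4, PySem.List.pyGetD_natCast, Nat.cast_eq_one]
  simp only [Function.comp_def, hF]
  rw [List.filter_map, List.map_map]
  simp [Function.comp_def]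

-- ===== VERDICT (by name: the statement is the Claim_ definition above) =====
theorem generate_schemas_from_solution_spec : Claim_equal_generate_schemas_from_solution := by
  unfold Claim_equal_generate_schemas_from_solution
  intro bitstring original index hdom hpre
  unfold Spec_generate_schemas_from_solution
  obtain ⟨h0, hle⟩ := hpre
  have hidx : index = ((index.toNat : Nat) : Int) := (Int.toNat_of_nonneg h0).symm
  set i := index.toNat with hidef
  set bl := bitstring.toList with hbl
  have hile : i ≤ bl.length := by omega
  set m := bl.length - i with hmdef
  have hA : generate_schemas_from_solution bitstring original index =
      ((pvLeaves m bl i).filter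
        (fun x => decide (x ≠ (match original with | none => bitstring | some o => o).toList))).map String.ofList := by
    unfold generate_schemas_from_solution
    simp only []
    rw [hidx]
    have hfuel : (((bl.length : Int)) - ((i : Nat) : Int)).toNat + 1 = m + 1 := by omega
    rw [hfuel]
    exact pvGenA_eq m bl _ i (m + 1) (by omega) (by omega)
  rw [hA, hidx, pvAlt_eq bitstring original i hile, ← hmdef, ← hbl,
      pvLeaves_eq_map m bl i (by omega)]
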